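-- pv_equiv track=rewrite | github.com/qlitre/qlitre-utils | src/qlitreutils/array/utils.py | get_connected_value_list
-- ===== SOURCE A (Python) =====
-- from collections import deque, defaultdict
--
-- def get_connected_value_list(a_list: list, start_value) -> list:
--     """
--     タプルのリストを受け取り、繋がっている要素をリストにして返す
--     例えばある地点からスタートして、どこまでたどり着けるか調べる
--     warning:割と速度に不安がある。技術試験などでは辞書かして、get_can_visitを使った方がよい
--     :param a_list ex.[(1, 2), (1, 3), (3, 6), (4, 5)]
--     :param start_value 最初に調べる値、例えばスタート地点
--     """
--     ret = [start_value]
--     checked = set()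
--     checked.add(start_value)
--     que = deque([start_value])
--     while que:
--         check_val = que.popleft()
--         for item in a_list:
--             if check_val not in item:
--                 continue
--             for elm in item:
--                 if elm in checked:
--                     continue
--                 else:
--                     ret.append(elm)
--                     que.append(elm)
--                     checked.add(elm)
--     return ret
-- ===== SOURCE B (Python) =====
-- def get_connected_value_list(a_list: list, start_value) -> list:
--     """Hypergraph BFS: index value -> indices of edges containing it, expand each
--     edge at most once (after its first expansion all its elements are seen, so
--     re-expanding it can never add anything), and use the result list itself as
--     the queue via an index pointer."""
--     edges_of = {}
--     for idx, item in enumerate(a_list):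
--         for elm in dict.fromkeys(item):
--             edges_of.setdefault(elm, []).append(idx)
--     order = [start_value]
--     seen = {start_value}
--     used = set()
--     i = 0
--     while i < len(order):
--         for idx in edges_of.get(order[i], []):
--             if idx not in used:
--                 used.add(idx)
--                 for elm in a_list[idx]:
--                     if elm not in seen:
--                         seen.add(elm)
--                         order.append(elm)
--         i += 1
--     return order
-- ===== Notes on version B (the rewrite author's own statement) =====
-- stated objective: alternative
-- what changed: B runs a hypergraph BFS: it precomputes a value-to-edge-indices dictionary once, expands each edge at most once via a visited-edge set, and uses the result list itself as the queue via an index pointer, instead of A's rescan of the whole edge list (with a separate deque and result list) for every dequeued value.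
import Mathlib
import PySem

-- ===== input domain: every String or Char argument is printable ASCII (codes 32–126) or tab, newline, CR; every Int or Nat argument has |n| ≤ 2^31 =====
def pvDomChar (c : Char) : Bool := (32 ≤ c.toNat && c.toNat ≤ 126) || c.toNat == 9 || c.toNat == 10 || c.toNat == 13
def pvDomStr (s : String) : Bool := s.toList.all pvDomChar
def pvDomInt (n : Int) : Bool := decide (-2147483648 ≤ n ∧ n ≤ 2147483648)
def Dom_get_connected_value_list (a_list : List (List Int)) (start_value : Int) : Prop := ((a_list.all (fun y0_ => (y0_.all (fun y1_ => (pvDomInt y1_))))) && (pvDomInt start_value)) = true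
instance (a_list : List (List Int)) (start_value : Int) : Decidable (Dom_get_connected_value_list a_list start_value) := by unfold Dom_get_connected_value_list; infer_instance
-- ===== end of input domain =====

-- B replaces A's rescan of the whole edge list per dequeued value by a hypergraph BFS:
-- a value→edge-indices index built once, a visited-edge set so each edge is expanded at
-- most once, and the result list itself used as the queue via an index pointer
-- (objective: alternative). Each Lean loop carries an explicit fuel parameter
-- (1 + total element count) purely as a totality guard; both loops advance once per
-- dequeued value.

-- ===== PORT A =====
-- inner 'for elm in item' loop of A; state = (ret, checked, que-tail)
def pvInner (s : List Int × PySem.Set Int × List Int) (item : List Int) :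
    List Int × PySem.Set Int × List Int :=
  item.foldl (fun t elm =>
    if elm ∈ t.2.1 then t
    else (t.1 ++ [elm], PySem.Set.add t.2.1 elm, t.2.2 ++ [elm])) s

-- the 'while que' loop of A; each step scans the whole a_list
def pvLoopA (a_list : List (List Int)) : Nat → List Int × PySem.Set Int × List Int → List Int
  | 0, s => s.1
  | fuel + 1, s =>
    match s.2.2 with
    | [] => s.1
    | v :: rest =>
      pvLoopA a_list fuel
        (a_list.foldl (fun t item => if v ∈ item then pvInner t item else t) (s.1, s.2.1, rest))

def get_connected_value_list (a_list : List (List Int)) (start_value : Int) : List Int :=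
  pvLoopA a_list (1 + (a_list.map List.length).sum)
    ([start_value], PySem.Set.add PySem.Set.empty start_value, [start_value])

-- ===== PORT B =====
-- for idx, item in enumerate(a_list): for elm in dict.fromkeys(item): edges_of.setdefault(elm, []).append(idx)
def pvAdjB (a_list : List (List Int)) : PySem.Dict Int (List Int) :=
  (PySem.List.enumerate a_list).foldl (fun d p =>
    (PySem.List.dedup p.2).foldl (fun d elm => d.insert elm (d.getD elm [] ++ [p.1])) d)
    PySem.Dict.empty

-- body of B's 'for elm in a_list[idx]' loop; state = (order, seen)
def pvStep2 (p : List Int × PySem.Set Int) (elm : Int) : List Int × PySem.Set Int :=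
  if elm ∈ p.2 then p else (p.1 ++ [elm], PySem.Set.add p.2 elm)

-- body of B's 'for idx in edges_of.get(order[i], [])' loop; state = (order, seen, used);
-- idx comes from enumerate, so it is in range and pyGetD is exactly Python's a_list[idx]
def pvStepB (a_list : List (List Int)) (s : List Int × PySem.Set Int × PySem.Set Int)
    (idx : Int) : List Int × PySem.Set Int × PySem.Set Int :=
  if idx ∈ s.2.2 then s
  else
    let used' := PySem.Set.add s.2.2 idx
    let p := (PySem.List.pyGetD a_list idx []).foldl pvStep2 (s.1, s.2.1)
    (p.1, p.2, used')

-- the 'while i < len(order)' loop of B; the result list doubles as the queue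
def pvLoopB (a_list : List (List Int)) (adj : PySem.Dict Int (List Int)) :
    Nat → List Int × PySem.Set Int × PySem.Set Int → Nat → List Int
  | 0, s, _ => s.1
  | fuel + 1, s, i =>
    if h : i < s.1.length then
      pvLoopB a_list adj fuel ((adj.getD s.1[i] []).foldl (pvStepB a_list) s) (i + 1)
    else s.1

def get_connected_value_list_alt (a_list : List (List Int)) (start_value : Int) : List Int :=
  pvLoopB a_list (pvAdjB a_list) (1 + (a_list.map List.length).sum)
    ([start_value], PySem.Set.add PySem.Set.empty start_value, PySem.Set.empty) 0

-- ===== PRECONDITION & SPEC =====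
def Spec_get_connected_value_list (a_list : List (List Int)) (start_value : Int) (out : List Int) : Prop := out = get_connected_value_list_alt a_list start_value
instance (a_list : List (List Int)) (start_value : Int) (out : List Int) : Decidable (Spec_get_connected_value_list a_list start_value out) := by unfold Spec_get_connected_value_list; infer_instance

-- ===== CLAIM (what is proved, stated in full; the proofs are below) =====
def Claim_equal_get_connected_value_list : Prop := ∀ (a_list : List (List Int)) (start_value : Int), Dom_get_connected_value_list a_list start_value → Spec_get_connected_value_list a_list start_value (get_connected_value_list a_list start_value)

-- ===== LEMMAS AND PROOFS =====

-- the fresh elements a scan of l contributes, and the resulting seen-set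
def pvExp (seen : PySem.Set Int) : List Int → List Int × PySem.Set Int
  | [] => ([], seen)
  | e :: l =>
    if e ∈ seen then pvExp seen l
    else
      let p := pvExp (PySem.Set.add seen e) l
      (e :: p.1, p.2)

lemma pvExp_mem_seen (l : List Int) (seen : PySem.Set Int) (e : Int) (he : e ∈ seen) :
    e ∈ (pvExp seen l).2 := by
  induction l generalizing seen with
  | nil => simpa [pvExp]
  | cons x t ih =>
    by_cases hx : x ∈ seen
    · simp only [pvExp, if_pos hx]
      exact ih seen he
    · simp only [pvExp, if_neg hx]
      exact ih _ ((PySem.Set.mem_add _ _ _).mpr (Or.inl he))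

lemma pvExp_mem_self (l : List Int) (seen : PySem.Set Int) (e : Int) (he : e ∈ l) :
    e ∈ (pvExp seen l).2 := by
  induction l generalizing seen with
  | nil => cases he
  | cons x t ih =>
    by_cases hx : x ∈ seen
    · rcases List.mem_cons.mp he with rfl | ht
      · simp only [pvExp, if_pos hx]
        exact pvExp_mem_seen t seen e hx
      · simp only [pvExp, if_pos hx]
        exact ih seen ht
    · rcases List.mem_cons.mp he with rfl | ht
      · simp only [pvExp, if_neg hx]
        exact pvExp_mem_seen t _ e ((PySem.Set.mem_add _ _ _).mpr (Or.inr rfl))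
      · simp only [pvExp, if_neg hx]
        exact ih _ ht

lemma pvExp_nil_of_subset (l : List Int) (seen : PySem.Set Int)
    (h : ∀ e ∈ l, e ∈ seen) : pvExp seen l = ([], seen) := by
  induction l with
  | nil => rfl
  | cons x t ih =>
    have hx : x ∈ seen := h x (by simp)
    simp only [pvExp, if_pos hx]
    exact ih fun e he => h e (by simp [he])

-- B's inner fold in terms of pvExp
lemma foldl_pvStep2 (l : List Int) (ord : List Int) (seen : PySem.Set Int) :
    l.foldl pvStep2 (ord, seen) = (ord ++ (pvExp seen l).1, (pvExp seen l).2) := by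
  induction l generalizing ord seen with
  | nil => simp [pvExp]
  | cons e t ih =>
    by_cases he : e ∈ seen
    · simp [pvStep2, pvExp, he, ih]
    · simp [pvStep2, pvExp, he, ih]

-- A's inner fold (on the triple state) in terms of pvExp
lemma foldl_inner3 (l : List Int) (r : List Int) (seen : PySem.Set Int) (q : List Int) :
    pvInner (r, seen, q) l
      = (r ++ (pvExp seen l).1, (pvExp seen l).2, q ++ (pvExp seen l).1) := by
  unfold pvInner
  induction l generalizing r seen q with
  | nil => simp [pvExp]
  | cons e t ih =>
    by_cases he : e ∈ seen
    · simp [pvExp, he, ih]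
    · simp [pvExp, he, ih]

-- joint effect of dispatching a list of (index, edge) pairs: fresh elements, seen', used'
def pvRun (a_list : List (List Int)) (seen used : PySem.Set Int) :
    List (Int × List Int) → List Int × PySem.Set Int × PySem.Set Int
  | [] => ([], seen, used)
  | p :: L =>
    if p.1 ∈ used then pvRun a_list seen used L
    else
      let d := pvExp seen p.2
      let r := pvRun a_list d.2 (PySem.Set.add used p.1) L
      (d.1 ++ r.1, r.2)

-- loop invariant: every used edge is fully seen
def pvInv (a_list : List (List Int)) (seen used : PySem.Set Int) : Prop :=
  ∀ idx ∈ used, ∀ e ∈ PySem.List.pyGetD a_list idx [], e ∈ seen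

lemma pvRun_inv (a_list : List (List Int)) (L : List (Int × List Int))
    (seen used : PySem.Set Int)
    (hL : ∀ p ∈ L, PySem.List.pyGetD a_list p.1 [] = p.2)
    (hInv : pvInv a_list seen used) :
    pvInv a_list (pvRun a_list seen used L).2.1 (pvRun a_list seen used L).2.2 := by
  induction L generalizing seen used with
  | nil => simpa [pvRun]
  | cons p t ih =>
    by_cases hp : p.1 ∈ used
    · simpa [pvRun, hp] using
        ih seen used (fun q hq => hL q (by simp [hq])) hInv
    · simp only [pvRun, if_neg hp]
      refine ih _ _ (fun q hq => hL q (by simp [hq])) ?_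
      intro idx hidx e he
      rcases (PySem.Set.mem_add _ _ _).mp hidx with hold | rfl
      · exact pvExp_mem_seen _ _ _ (hInv idx hold e he)
      · have := hL p (by simp)
        rw [this] at he
        exact pvExp_mem_self _ _ _ he
  
-- B's dispatch fold in terms of pvRun
lemma foldl_stepB_run (a_list : List (List Int)) (L : List (Int × List Int))
    (ord : List Int) (seen used : PySem.Set Int)
    (hL : ∀ p ∈ L, PySem.List.pyGetD a_list p.1 [] = p.2) :
    (L.map Prod.fst).foldl (pvStepB a_list) (ord, seen, used)
      = (ord ++ (pvRun a_list seen used L).1,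
         (pvRun a_list seen used L).2.1, (pvRun a_list seen used L).2.2) := by
  induction L generalizing ord seen used with
  | nil => simp [pvRun]
  | cons p t ih =>
    by_cases hp : p.1 ∈ used
    · simpa [pvRun, pvStepB, hp] using
        ih ord seen used (fun q hq => hL q (by simp [hq]))
    · simp only [List.map_cons, List.foldl_cons, pvStepB, if_neg hp, pvRun,
        hL p (by simp), foldl_pvStep2]
      rw [ih _ _ _ (fun q hq => hL q (by simp [hq]))]
      simp

-- A's dispatch fold (over the edges themselves, expanding every time) in terms of pvRun
lemma foldl_innerA_run (a_list : List (List Int)) (L : List (Int × List Int))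
    (r : List Int) (seen used : PySem.Set Int) (q : List Int)
    (hL : ∀ p ∈ L, PySem.List.pyGetD a_list p.1 [] = p.2)
    (hInv : pvInv a_list seen used) :
    (L.map Prod.snd).foldl pvInner (r, seen, q)
      = (r ++ (pvRun a_list seen used L).1,
         (pvRun a_list seen used L).2.1, q ++ (pvRun a_list seen used L).1) := by
  induction L generalizing r seen used q with
  | nil => simp [pvRun]
  | cons p t ih =>
    simp only [List.map_cons, List.foldl_cons, foldl_inner3]
    by_cases hp : p.1 ∈ used
    · have hsub : ∀ e ∈ p.2, e ∈ seen := by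
        intro e he
        exact hInv p.1 hp e (by rw [hL p (by simp)]; exact he)
      rw [pvExp_nil_of_subset p.2 seen hsub]
      simpa [pvRun, hp] using
        ih r seen used q (fun x hx => hL x (by simp [hx])) hInv
    · simp only [pvRun, if_neg hp]
      have hinv' : pvInv a_list (pvExp seen p.2).2 (PySem.Set.add used p.1) := by
        intro idx hidx e he
        rcases (PySem.Set.mem_add _ _ _).mp hidx with hold | rfl
        · exact pvExp_mem_seen _ _ _ (hInv idx hold e he)
        · have := hL p (by simp)
          rw [this] at he
          exact pvExp_mem_self _ _ _ he
      rw [ih (r ++ (pvExp seen p.2).1) (pvExp seen p.2).2 (PySem.Set.add used p.1)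
        (q ++ (pvExp seen p.2).1) (fun x hx => hL x (by simp [hx])) hinv']
      simp

-- one item's contribution to the adjacency dict, at key v
lemma pvAdj_item_getD (v : Int) (idx : Int) (l : List Int) (hl : l.Nodup)
    (d : PySem.Dict Int (List Int)) :
    (l.foldl (fun d elm => d.insert elm (d.getD elm [] ++ [idx])) d).getD v []
      = d.getD v [] ++ (if v ∈ l then [idx] else []) := by
  induction l generalizing d with
  | nil => simp
  | cons e t ih =>
    rcases List.nodup_cons.mp hl with ⟨he, ht⟩
    simp only [List.foldl_cons, ih ht]
    by_cases hv : v = e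
    · subst hv
      rw [PySem.Dict.getD_insert_self]
      simp [he]
    · rw [PySem.Dict.getD_insert_of_ne (hne := hv)]
      simp [hv]

-- adjacency lookup = the indices of the edges containing v, in list order
lemma pvAdj_getD (a_list : List (List Int)) (v : Int) :
    (pvAdjB a_list).getD v []
      = (((PySem.List.enumerate a_list).filter (fun p => decide (v ∈ p.2))).map Prod.fst) := by
  unfold pvAdjB
  suffices h : ∀ (xs : List (Int × List Int)) (d : PySem.Dict Int (List Int)),
      (xs.foldl (fun d p =>
        (PySem.List.dedup p.2).foldl (fun d elm => d.insert elm (d.getD elm [] ++ [p.1])) d) d).getD v []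
      = d.getD v [] ++ ((xs.filter (fun p => decide (v ∈ p.2))).map Prod.fst) by
    simpa using h (PySem.List.enumerate a_list) PySem.Dict.empty
  intro xs
  induction xs with
  | nil => simp
  | cons p t ih =>
    intro d
    simp only [List.foldl_cons, ih]
    rw [pvAdj_item_getD v p.1 _ (PySem.List.nodup_dedup p.2)]
    by_cases hv : v ∈ p.2
    · simp [hv]
    · simp [hv]

-- the filtered enumerate projects back onto the filtered edge list
lemma map_snd_filter_enumerate (a_list : List (List Int)) (v : Int) :
    (((PySem.List.enumerate a_list).filter (fun p => decide (v ∈ p.2))).map Prod.snd)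
      = a_list.filter (fun item => decide (v ∈ item)) := by
  have h : ∀ (xs : List (Int × List Int)),
      ((xs.filter (fun p => decide (v ∈ p.2))).map Prod.snd)
        = (xs.map Prod.snd).filter (fun item => decide (v ∈ item)) := by
    intro xs
    induction xs with
    | nil => rfl
    | cons p t ih =>
      by_cases hv : v ∈ p.2
      · simp [hv, ih]
      · simp [hv, ih]
  rw [h]
  have := PySem.List.map_snd_enumerate a_list 0
  simp only [show (fun x : Int × List Int => x.2) = Prod.snd from rfl] at this
  rw [this]

-- every pair of the filtered enumerate looks its edge up correctly
lemma filter_enumerate_getD (a_list : List (List Int)) (v : Int) :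
    ∀ p ∈ (PySem.List.enumerate a_list).filter (fun p => decide (v ∈ p.2)),
      PySem.List.pyGetD a_list p.1 [] = p.2 := by
  intro p hp
  have hmem : p ∈ PySem.List.enumerate a_list := List.mem_of_mem_filter hp
  rcases (PySem.List.mem_enumerate_iff a_list 0 p).mp hmem with ⟨k, hk, rfl⟩
  simp [PySem.List.pyGetD_natCast, List.getD_eq_getElem?_getD, hk]

-- bisimulation: A's queue is always the undispatched suffix of B's order list
lemma pvLoop_eq (a_list : List (List Int)) (fuel : Nat) :
    ∀ (ret : List Int) (seen used : PySem.Set Int) (i : Nat), i ≤ ret.length →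
      pvInv a_list seen used →
      pvLoopA a_list fuel (ret, seen, ret.drop i)
        = pvLoopB a_list (pvAdjB a_list) fuel (ret, seen, used) i := by
  induction fuel with
  | zero => intro ret seen used i _ _; rfl
  | succ n ih =>
    intro ret seen used i hi hInv
    by_cases h : i < ret.length
    · rw [List.drop_eq_getElem_cons h]
      simp only [pvLoopA, pvLoopB, dif_pos h]
      set v := ret[i]
      set L := (PySem.List.enumerate a_list).filter (fun p => decide (v ∈ p.2)) with hLdef
      have hL := filter_enumerate_getD a_list v
      rw [PySem.List.foldl_ite_eq_foldl_filter (p := fun item => v ∈ item) (f := pvInner)]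
      rw [← map_snd_filter_enumerate a_list v]
      rw [foldl_innerA_run a_list L _ _ _ _ hL hInv]
      rw [pvAdj_getD a_list v]
      rw [foldl_stepB_run a_list L _ _ _ hL]
      have hq : ret.drop (i + 1) ++ (pvRun a_list seen used L).1
          = (ret ++ (pvRun a_list seen used L).1).drop (i + 1) := by
        rw [List.drop_append_of_le_length (by omega)]
      rw [hq]
      exact ih _ _ _ _ (by simp; omega) (pvRun_inv a_list L seen used hL hInv)
    · have hlen : ret.drop i = [] := by simp; omega
      simp only [pvLoopA, pvLoopB, hlen, dif_neg h]

-- ===== VERDICT (by name: the statement is the Claim_ definition above) =====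
theorem get_connected_value_list_spec : Claim_equal_get_connected_value_list := by
  intro a_list start_value _
  unfold Spec_get_connected_value_list get_connected_value_list get_connected_value_list_alt
  have := pvLoop_eq a_list (1 + (a_list.map List.length).sum)
    [start_value] (PySem.Set.add PySem.Set.empty start_value) PySem.Set.empty 0
    (by simp) (by intro idx hidx; cases hidx)
  simpa using this
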